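-- pv_equiv track=rewrite | github.com/HYOJAECHOI/pms-project | backend/seed_data.py | build_position_list
-- ===== SOURCE A (Python) =====
-- POSITION_QUOTA = [
--     ("본부장", 1),
--     ("이사",   2),
--     ("수석",   3),
--     ("책임",   5),
--     ("대리",   5),
-- ]
--
-- def build_position_list(n_users: int):
--     """n_users 만큼 직위 리스트 생성 (쿼터 우선, 나머지 사원)."""
--     positions = []
--     remaining = n_users
--     for pos, qty in POSITION_QUOTA:
--         take = min(qty, remaining)
--         positions.extend([pos] * take)
--         remaining -= take
--         if remaining <= 0:
--             break
--     positions.extend(["사원"] * remaining)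
--     return positions
-- ===== SOURCE B (Python) =====
-- POSITION_QUOTA = [
--     ("본부장", 1),
--     ("이사",   2),
--     ("수석",   3),
--     ("책임",   5),
--     ("대리",   5),
-- ]
--
-- def build_position_list(n_users: int):
--     flat = [title for title, qty in POSITION_QUOTA for _ in range(qty)]
--     m = max(n_users, 0)
--     if m <= len(flat):
--         return flat[:m]
--     return flat + ["사원"] * (m - len(flat))
-- ===== Notes on version B (the rewrite author's own statement) =====
-- stated objective: simpler
-- what changed: Replaces the stateful take=min(qty,remaining)/break loop with a once-built fully expanded quota table, then a single clamp-slice-or-pad step.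
import Mathlib
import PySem

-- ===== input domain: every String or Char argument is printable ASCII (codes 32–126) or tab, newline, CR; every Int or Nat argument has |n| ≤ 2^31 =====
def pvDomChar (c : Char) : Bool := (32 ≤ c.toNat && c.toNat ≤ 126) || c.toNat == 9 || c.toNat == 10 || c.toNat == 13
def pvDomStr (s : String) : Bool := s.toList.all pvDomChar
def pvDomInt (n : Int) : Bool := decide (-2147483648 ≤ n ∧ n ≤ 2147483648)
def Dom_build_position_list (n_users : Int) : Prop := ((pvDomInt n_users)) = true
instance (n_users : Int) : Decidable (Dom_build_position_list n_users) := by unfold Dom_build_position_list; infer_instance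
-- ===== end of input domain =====

-- B builds the fully expanded quota table once and then slices or pads it, replacing A's stateful min/break loop (objective: simpler).

-- ===== PORT A =====
-- Fixed quota table (title, qty), transliterated from POSITION_QUOTA.
def POSITION_QUOTA : List (String × Int) :=
  [("본부장", 1), ("이사", 2), ("수석", 3), ("책임", 5), ("대리", 5)]

-- the for-loop with break; `[p] * take` with a possibly negative take is empty, matching .toNat
def buildA_loop : List (String × Int) → List String → Int → List String
  | [], positions, remaining => positions ++ List.replicate remaining.toNat "사원"
  | (pos, qty) :: rest, positions, remaining =>
      let take := min qty remaining
      let positions' := positions ++ List.replicate take.toNat pos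
      let remaining' := remaining - take
      if remaining' ≤ 0 then positions' ++ List.replicate remaining'.toNat "사원"
      else buildA_loop rest positions' remaining'

def build_position_list (n_users : Int) : List String :=
  buildA_loop POSITION_QUOTA [] n_users

-- ===== PORT B =====
-- B: build the expanded table once, clamp n, then slice or pad.
def build_position_list_alt (n_users : Int) : List String :=
  let flat := POSITION_QUOTA.flatMap (fun tq => List.replicate tq.2.toNat tq.1)
  let m := max n_users 0
  if m ≤ (flat.length : Int) then flat.take m.toNat
  else flat ++ List.replicate (m - (flat.length : Int)).toNat "사원"

-- ===== PRECONDITION & SPEC =====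
def Spec_build_position_list (n_users : Int) (out : List String) : Prop := out = build_position_list_alt n_users
instance (n_users : Int) (out : List String) : Decidable (Spec_build_position_list n_users out) := by unfold Spec_build_position_list; infer_instance

-- ===== CLAIM (what is proved, stated in full; the proofs are below) =====
def Claim_equal_build_position_list : Prop := ∀ (n_users : Int), Dom_build_position_list n_users → Spec_build_position_list n_users (build_position_list n_users)

-- ===== LEMMAS AND PROOFS =====

-- ===== VERDICT (by name: the statement is the Claim_ definition above) =====
theorem build_position_list_spec : Claim_equal_build_position_list := by
  intro n _
  unfold Spec_build_position_list
  by_cases h16 : n ≤ 16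
  · by_cases h0 : 0 ≤ n
    · interval_cases n <;> decide
    · have hm1 : min (1:Int) n = n := by omega
      have ht : n.toNat = 0 := by omega
      simp [build_position_list, build_position_list_alt, buildA_loop, POSITION_QUOTA,
        hm1, ht, max_eq_right (by omega : n ≤ 0)]
  · have hm1 : min (1:Int) n = 1 := by omega
    have hm2 : min (2:Int) (n - 1) = 2 := by omega
    have hm3 : min (3:Int) (n - 1 - 2) = 3 := by omega
    have hm4 : min (5:Int) (n - 1 - 2 - 3) = 5 := by omega
    have hm5 : min (5:Int) (n - 1 - 2 - 3 - 5) = 5 := by omega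
    have he : n - 1 - 2 - 3 - 5 - 5 = n - 16 := by omega
    simp [build_position_list, build_position_list_alt, buildA_loop, POSITION_QUOTA,
      hm1, hm2, hm3, hm4, hm5, he, max_eq_left (by omega : (0:Int) ≤ n),
      (show ¬ n ≤ 1 by omega), (show ¬ n ≤ 3 by omega), (show ¬ n ≤ 6 by omega),
      (show ¬ n ≤ 11 by omega), (show ¬ n ≤ 16 by omega)]
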